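-- pv_equiv track=rewrite | github.com/gregory912/currency-exchange-app | management/validation.py | validation_space_or_alpha_not_digit
-- ===== SOURCE A (Python) =====
-- def validation_space_or_alpha_not_digit(entered_item: str) -> bool:
--     """Check if the entered value contains space, letters"""
--     if not entered_item:
--         return False
--     if entered_item[:1] == ' ' or entered_item[-1:] == ' ':
--         return False
--     if entered_item.replace(' ', '').isdigit():
--         return False
--     for x in entered_item:
--         if not (x == ' ' or x.isalnum()):
--             return False
--     return True
-- ===== SOURCE B (Python) =====
-- def validation_space_or_alpha_not_digit(entered_item: str) -> bool:
--     """Check if the entered value contains space, letters (single fused scan)."""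
--     if not entered_item:
--         return False
--     if entered_item[0] == ' ' or entered_item[-1] == ' ':
--         return False
--     has_nonspace = False
--     all_digits = True
--     for x in entered_item:
--         if x == ' ':
--             continue
--         if not x.isalnum():
--             return False
--         has_nonspace = True
--         all_digits = all_digits and x.isdigit()
--     return not (has_nonspace and all_digits)
-- ===== Notes on version B (the rewrite author's own statement) =====
-- stated objective: alternative
-- what changed: Replaced A's separate space-stripped isdigit pre-scan plus validation loop by one fused pass maintaining has_nonspace/all_digits flags, deciding the all-digits rejection at the end; no intermediate string is built.
import Mathlib
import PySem

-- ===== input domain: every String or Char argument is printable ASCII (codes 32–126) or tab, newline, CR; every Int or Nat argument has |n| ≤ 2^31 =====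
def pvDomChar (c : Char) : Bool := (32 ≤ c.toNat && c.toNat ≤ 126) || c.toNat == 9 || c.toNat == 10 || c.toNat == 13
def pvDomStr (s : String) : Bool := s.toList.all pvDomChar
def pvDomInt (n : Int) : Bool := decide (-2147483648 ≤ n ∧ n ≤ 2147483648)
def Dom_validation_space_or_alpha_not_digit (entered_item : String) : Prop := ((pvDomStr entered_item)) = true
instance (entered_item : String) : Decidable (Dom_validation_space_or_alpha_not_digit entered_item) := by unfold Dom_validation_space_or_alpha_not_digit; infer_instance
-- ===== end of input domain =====

-- B fuses A's replace(' ','').isdigit() pre-scan and its validation loop into one pass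
-- with has_nonspace/all_digits flags (objective: alternative decomposition, same cost).

-- ===== PORT A =====
def validation_space_or_alpha_not_digit (entered_item : String) : Bool :=
  let s := entered_item.toList
  if s.isEmpty then false
  else if PySem.List.slice s none (some 1) == [' '] || PySem.List.slice s (some (-1)) none == [' '] then false
  else if PySem.Chars.strIsdigit (PySem.Chars.replace s [' '] []) then false
  else s.all (fun x => x == ' ' || PySem.Chars.isalnum x)

-- ===== PORT B =====
-- the fused scan: state = (has_nonspace, all_digits)
def pvAltLoop : List Char → Bool → Bool → Bool
  | [], has_nonspace, all_digits => !(has_nonspace && all_digits)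
  | x :: xs, has_nonspace, all_digits =>
    if x == ' ' then pvAltLoop xs has_nonspace all_digits
    else if !(PySem.Chars.isalnum x) then false
    else pvAltLoop xs true (all_digits && PySem.Chars.isdigit x)

def validation_space_or_alpha_not_digit_alt (entered_item : String) : Bool :=
  match entered_item.toList with
  | [] => false
  | c :: cs =>
    if c == ' ' || cs.getLastD c == ' ' then false
    else pvAltLoop (c :: cs) false true

-- ===== PRECONDITION & SPEC =====
def Spec_validation_space_or_alpha_not_digit (entered_item : String) (out : Bool) : Prop := out = validation_space_or_alpha_not_digit_alt entered_item
instance (entered_item : String) (out : Bool) : Decidable (Spec_validation_space_or_alpha_not_digit entered_item out) := by unfold Spec_validation_space_or_alpha_not_digit; infer_instance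

-- ===== CLAIM (what is proved, stated in full; the proofs are below) =====
def Claim_equal_validation_space_or_alpha_not_digit : Prop := ∀ (entered_item : String), Dom_validation_space_or_alpha_not_digit entered_item → Spec_validation_space_or_alpha_not_digit entered_item (validation_space_or_alpha_not_digit entered_item)

-- ===== LEMMAS AND PROOFS =====

-- replace s ' ' '' is filtering out the spaces
theorem pv_replace_go_space (fuel : Nat) (l acc : List Char) (h : l.length ≤ fuel) :
    PySem.Chars.replace.go [' '] [] fuel l acc = acc.reverse ++ l.filter (fun x => !(x == ' ')) := by
  induction fuel generalizing l acc with
  | zero =>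
    have : l = [] := List.eq_nil_of_length_eq_zero (Nat.le_zero.mp h)
    subst this; simp [PySem.Chars.replace.go]
  | succ n ih =>
    cases l with
    | nil => simp [PySem.Chars.replace.go]
    | cons c t =>
      simp only [PySem.Chars.replace.go]
      by_cases hc : c = ' '
      · subst hc
        have hpre : [' '].isPrefixOf (' ' :: t) = true := by simp [List.isPrefixOf]
        simp only [hpre, if_true, List.reverse_nil, List.nil_append, List.length_cons,
          List.length_nil, List.drop_succ_cons, List.drop_zero]
        rw [ih t acc (by simpa using h)]
        simp
      · have hpre : [' '].isPrefixOf (c :: t) = false := by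
          simp [List.isPrefixOf, Ne.symm hc]
        simp only [hpre, Bool.false_eq_true, if_false]
        rw [ih t (c :: acc) (by simpa using Nat.le_of_succ_le_succ (by simpa using h))]
        simp [List.filter_cons, hc]

theorem pv_replace_space (s : List Char) :
    PySem.Chars.replace s [' '] [] = s.filter (fun x => !(x == ' ')) := by
  simp only [PySem.Chars.replace, List.isEmpty_cons, Bool.false_eq_true, if_false]
  simpa using pv_replace_go_space s.length s [] (le_refl _)

-- characterisation of the fused loop
theorem pvAltLoop_eq (cs : List Char) (h a : Bool) :
    pvAltLoop cs h a =
      ((cs.all (fun x => x == ' ' || PySem.Chars.isalnum x)) &&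
        !((h || !(cs.filter (fun x => !(x == ' '))).isEmpty) &&
          (a && (cs.filter (fun x => !(x == ' '))).all PySem.Chars.isdigit))) := by
  induction cs generalizing h a with
  | nil => simp [pvAltLoop]
  | cons x xs ih =>
    by_cases hx : x = ' '
    · subst hx
      simp [pvAltLoop, List.filter_cons, ih]
    · by_cases hal : PySem.Chars.isalnum x = true
      · have hxs : (x == ' ') = false := by simp [hx]
        simp only [pvAltLoop, hxs, Bool.false_eq_true, if_false, hal, Bool.not_true,
          if_false, List.filter_cons, Bool.not_false, if_true, List.all_cons,
          List.isEmpty_cons, Bool.true_or, Bool.or_true, Bool.not_false, Bool.true_and]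
        rw [ih]
        cases a <;> cases h <;> cases hd : PySem.Chars.isdigit x <;>
          simp [hd] <;> cases (xs.filter (fun x => !(x == ' '))).all PySem.Chars.isdigit <;> simp
      · have hxs : (x == ' ') = false := by simp [hx]
        simp [pvAltLoop, hxs, hal]

-- the last element of a nonempty list, as A's slice computes it
theorem pv_drop_length (c : Char) (cs : List Char) :
    List.drop cs.length (c :: cs) = [cs.getLastD c] := by
  induction cs generalizing c with
  | nil => simp
  | cons d ds ih =>
    simp only [List.length_cons, List.drop_succ_cons]
    rw [ih d, List.getLastD_cons]

theorem pv_if_bool (C G : Bool) : (if C = true then false else G) = (G && !C) := by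
  cases C <;> cases G <;> simp

-- ===== VERDICT (by name: the statement is the Claim_ definition above) =====
theorem validation_space_or_alpha_not_digit_spec : Claim_equal_validation_space_or_alpha_not_digit := by
  intro entered_item _
  unfold Spec_validation_space_or_alpha_not_digit
  unfold validation_space_or_alpha_not_digit validation_space_or_alpha_not_digit_alt
  cases hs : entered_item.toList with
  | nil => simp
  | cons c cs =>
    simp only [List.isEmpty_cons, Bool.false_eq_true, if_false]
    have hsl1 : PySem.List.slice (c :: cs) none (some 1) = [c] := by
      rw [show (1 : Int) = ((1 : Nat) : Int) by norm_num, PySem.List.slice_to_natCast]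
      simp
    have hsl2 : PySem.List.slice (c :: cs) (some (-1)) none = [cs.getLastD c] := by
      rw [PySem.List.slice_from_neg_one]
      simpa using pv_drop_length c cs
    rw [hsl1, hsl2]
    by_cases hg : c = ' ' ∨ cs.getLastD c = ' '
    · have h1 : (c == ' ' || cs.getLastD c == ' ') = true := by
        rcases hg with hg | hg <;> rw [hg] <;> simp
      have h2 : (([c] == [' ']) || ([cs.getLastD c] == [' '])) = true := by
        rcases hg with hg | hg <;> rw [hg] <;> simp
      rw [h1, h2]
      simp
    · push_neg at hg
      have e2 : (cs.getLast?.getD c == ' ') = false := by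
        rw [beq_eq_false_iff_ne]
        simpa [← List.getLastD_eq_getLast?] using hg.2
      have h1 : (c == ' ' || cs.getLastD c == ' ') = false := by simp [hg.1, e2]
      have h2 : (([c] == [' ']) || ([cs.getLastD c] == [' '])) = false := by simp [hg.1, e2]
      rw [h1, h2]
      simp only [Bool.false_eq_true, if_false]
      rw [pv_replace_space, pvAltLoop_eq]
      simp only [PySem.Chars.strIsdigit, Bool.false_or, Bool.true_and]
      exact pv_if_bool _ _
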